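-- pv_equiv track=rewrite | github.com/codedChaos/Foo.Bar | The Grandest Staircase/solution1.py | bricks
-- ===== SOURCE A (Python) =====
-- def bricks(L, H, memoirs):
--     if memoirs[L][H] != 0:
--         return memoirs[L][H]
--     if H == L:
--         return 1
--     if H < L:
--         return 0
--
--     memoirs[L][H] = (bricks(L + 1, H - L, memoirs)) + (bricks(L + 1, H, memoirs))
--
--     return memoirs[L][H]
-- ===== SOURCE B (Python) =====
-- def bricks(L, H, memoirs):
--     # Iterative explicit-stack evaluation of the same memoized recurrence:
--     # visits exactly the states A's recursion visits, in the same order, and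
--     # performs the identical writes into the shared `memoirs` table.
--     stack = [(L, H, False)]
--     results = []
--     while stack:
--         l, h, expanded = stack.pop()
--         if expanded:
--             b = results.pop()
--             a = results.pop()
--             memoirs[l][h] = a + b
--             results.append(memoirs[l][h])
--             continue
--         c = memoirs[l][h]
--         if c != 0:
--             results.append(c)
--         elif h == l:
--             results.append(1)
--         elif h < l:
--             results.append(0)
--         else:
--             stack.append((l, h, True))
--             stack.append((l + 1, h, False))
--             stack.append((l + 1, h - l, False))
--     return results[-1]
-- ===== Notes on version B (the rewrite author's own statement) =====
-- stated objective: alternative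
-- what changed: Replaces A's memoized top-down recursion by an explicit-stack post-order worklist loop that resolves each state iteratively (push the two children, combine when both are resolved), visiting exactly the states A's recursion visits and performing the identical writes into the shared memoirs table.
-- outside the precondition, e.g. on bricks(1, 3, [[], [0, 0, 0, 0], [0, 0, 0, 2], [0]]): A returns 3, B returns 3
import Mathlib
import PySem

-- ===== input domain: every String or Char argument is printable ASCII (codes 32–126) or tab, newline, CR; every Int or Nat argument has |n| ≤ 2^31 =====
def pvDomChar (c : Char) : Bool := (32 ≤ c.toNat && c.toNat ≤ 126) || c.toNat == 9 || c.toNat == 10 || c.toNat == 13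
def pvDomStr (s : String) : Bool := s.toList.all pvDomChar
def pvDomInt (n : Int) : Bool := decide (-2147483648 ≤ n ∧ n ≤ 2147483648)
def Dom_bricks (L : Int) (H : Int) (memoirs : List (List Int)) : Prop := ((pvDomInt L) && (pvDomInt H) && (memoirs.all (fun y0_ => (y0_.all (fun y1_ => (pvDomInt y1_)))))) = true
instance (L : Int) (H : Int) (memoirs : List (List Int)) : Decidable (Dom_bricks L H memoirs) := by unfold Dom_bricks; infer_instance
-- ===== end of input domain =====

-- B replaces A's memoized top-down recursion by an explicit-stack post-order worklist
-- loop over the same states; it performs the identical in-place writes to `memoirs`.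

-- ===== PORT A =====
-- A is recursive with a shared mutable memo table; the port threads the table as state.
-- The fuel (H-L).toNat+1 is a totality guard only: each recursive call strictly
-- decreases (h-l).toNat when 0 ≤ l, so fuel never runs out on admitted inputs.
def bricksRunA : Nat → Int → Int → List (List Int) → Int × List (List Int)
  | 0, _, _, t => (0, t)
  | (fuel+1), l, h, t =>
    let m := PySem.List.pyGetD (PySem.List.pyGetD t l []) h 0
    if m ≠ 0 then (m, t)
    else if h = l then (1, t)
    else if h < l then (0, t)
    else
      let p := bricksRunA fuel (l+1) (h-l) t
      let q := bricksRunA fuel (l+1) h p.2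
      let t3 := PySem.List.pySetD q.2 l (PySem.List.pySetD (PySem.List.pyGetD q.2 l []) h (p.1 + q.1))
      (PySem.List.pyGetD (PySem.List.pyGetD t3 l []) h 0, t3)

def bricks (L : Int) (H : Int) (memoirs : List (List Int)) : Int :=
  (bricksRunA ((H - L).toNat + 1) L H memoirs).1

-- ===== PORT B =====
-- Source B's while-loop over (stack, results, memoirs); frames are (l, h, expanded), the
-- Python list's top (its end) is the head here.  The fuel 3^((H-L).toNat+1) is a
-- totality guard only: the loop runs at most that many iterations on admitted inputs.
def bricksRunB : Nat → List (Int × Int × Bool) → List Int → List (List Int) → List Int × List (List Int)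
  | _, [], results, t => (results, t)
  | 0, _ :: _, results, t => (results, t)   -- fuel exhausted; unreachable on admitted inputs
  | (fuel+1), (l, h, expanded) :: stack, results, t =>
    if expanded then
      match results with
      | b :: a :: rest =>
        let t' := PySem.List.pySetD t l (PySem.List.pySetD (PySem.List.pyGetD t l []) h (a + b))
        bricksRunB fuel stack (PySem.List.pyGetD (PySem.List.pyGetD t' l []) h 0 :: rest) t'
      | _ => (results, t)                   -- unreachable: an expanded frame has both child values
    else
      let c := PySem.List.pyGetD (PySem.List.pyGetD t l []) h 0
      if c ≠ 0 then bricksRunB fuel stack (c :: results) t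
      else if h = l then bricksRunB fuel stack ((1 : Int) :: results) t
      else if h < l then bricksRunB fuel stack ((0 : Int) :: results) t
      else bricksRunB fuel ((l+1, h-l, false) :: (l+1, h, false) :: (l, h, true) :: stack) results t

def bricks_alt (L : Int) (H : Int) (memoirs : List (List Int)) : Int :=
  -- results[-1]: `results` is modeled top-at-head and is nonempty when the loop ends
  (bricksRunB (3 ^ ((H - L).toNat + 1)) [(L, H, false)] [] memoirs).1.headD 0

-- ===== PRECONDITION & SPEC =====
-- Pre_ excludes the inputs on which the Python A raises (IndexError out of range, or deep
-- recursion from a negative L).  Whether a ragged/short table crashes A depends on which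
-- interior cells happen to be cached — not a closed-form condition — so Pre_ conservatively
-- requires the full rectangle of rows below (L,H); on an excluded ragged table where A's
-- cache hits let it return, B returns the very same value (see the cite in the claim).
def Pre_bricks (L : Int) (H : Int) (memoirs : List (List Int)) : Prop :=
  PySem.Raise.InRange memoirs.length L ∧
  PySem.Raise.InRange (PySem.List.pyGetD memoirs L []).length H ∧
  (PySem.List.pyGetD (PySem.List.pyGetD memoirs L []) H 0 ≠ 0 ∨ H ≤ L ∨
    (0 ≤ L ∧ 0 ≤ H ∧ H < (memoirs.length : Int) ∧
      ∀ i < H.toNat + 1, L.toNat ≤ i → H < ((memoirs.getD i []).length : Int)))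
instance (L : Int) (H : Int) (memoirs : List (List Int)) : Decidable (Pre_bricks L H memoirs) := by
  unfold Pre_bricks; infer_instance

def pvWitness_bricks : Int × Int × List (List Int) :=
  (1, 3, [[0,0,0,0],[0,0,0,0],[0,0,0,0],[0,0,0,0]])

def Spec_bricks (L : Int) (H : Int) (memoirs : List (List Int)) (out : Int) : Prop := out = bricks_alt L H memoirs
instance (L : Int) (H : Int) (memoirs : List (List Int)) (out : Int) : Decidable (Spec_bricks L H memoirs out) := by unfold Spec_bricks; infer_instance

-- ===== CLAIM (what is proved, stated in full; the proofs are below) =====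
def Claim_equal_bricks : Prop := ∀ (L : Int) (H : Int) (memoirs : List (List Int)), Dom_bricks L H memoirs → Pre_bricks L H memoirs → Spec_bricks L H memoirs (bricks L H memoirs)

-- ===== LEMMAS AND PROOFS =====

-- one-step evaluation shapes of bricksRunA
theorem runA_cache (fuel : Nat) (l h : Int) (t : List (List Int))
    (hmz : PySem.List.pyGetD (PySem.List.pyGetD t l []) h 0 ≠ 0) :
    bricksRunA (fuel+1) l h t = (PySem.List.pyGetD (PySem.List.pyGetD t l []) h 0, t) := by
  simp [bricksRunA, hmz]

theorem runA_base1 (fuel : Nat) (l h : Int) (t : List (List Int))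
    (hmz : PySem.List.pyGetD (PySem.List.pyGetD t l []) h 0 = 0) (hhl : h = l) :
    bricksRunA (fuel+1) l h t = (1, t) := by
  subst hhl; simp [bricksRunA, hmz]

theorem runA_base0 (fuel : Nat) (l h : Int) (t : List (List Int))
    (hmz : PySem.List.pyGetD (PySem.List.pyGetD t l []) h 0 = 0) (hhl : ¬ h = l) (hlt : h < l) :
    bricksRunA (fuel+1) l h t = (0, t) := by
  simp [bricksRunA, hmz, hhl, hlt]

theorem runA_rec (fuel : Nat) (l h : Int) (t : List (List Int))
    (hmz : PySem.List.pyGetD (PySem.List.pyGetD t l []) h 0 = 0) (hhl : ¬ h = l) (hlt : ¬ h < l) :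
    bricksRunA (fuel+1) l h t =
      (PySem.List.pyGetD (PySem.List.pyGetD (PySem.List.pySetD (bricksRunA fuel (l+1) h (bricksRunA fuel (l+1) (h-l) t).2).2 l
          (PySem.List.pySetD (PySem.List.pyGetD (bricksRunA fuel (l+1) h (bricksRunA fuel (l+1) (h-l) t).2).2 l []) h
            ((bricksRunA fuel (l+1) (h-l) t).1 + (bricksRunA fuel (l+1) h (bricksRunA fuel (l+1) (h-l) t).2).1))) l []) h 0,
       PySem.List.pySetD (bricksRunA fuel (l+1) h (bricksRunA fuel (l+1) (h-l) t).2).2 l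
          (PySem.List.pySetD (PySem.List.pyGetD (bricksRunA fuel (l+1) h (bricksRunA fuel (l+1) (h-l) t).2).2 l []) h
            ((bricksRunA fuel (l+1) (h-l) t).1 + (bricksRunA fuel (l+1) h (bricksRunA fuel (l+1) (h-l) t).2).1))) := by
  simp [bricksRunA, hmz, hhl, hlt]

-- THE SIMULATION: processing an unexpanded frame (l,h) with enough fuel takes the machine,
-- in some k steps, to the same stack with A's value pushed and A's mutated table.
theorem simB : ∀ (fa : Nat) (l h : Int) (t : List (List Int)), 0 ≤ l → (h - l).toNat < fa →
    ∃ k, k ≤ 3 ^ fa ∧ ∀ (st : List (Int × Int × Bool)) (res : List Int) (extra : Nat),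
      bricksRunB (k + extra) ((l, h, false) :: st) res t =
        bricksRunB extra st ((bricksRunA fa l h t).1 :: res) (bricksRunA fa l h t).2 := by
  intro fa
  induction fa with
  | zero => intro l h t _ hf; omega
  | succ fa ih =>
    intro l h t hl hf
    by_cases hmz : PySem.List.pyGetD (PySem.List.pyGetD t l []) h 0 ≠ 0
    · refine ⟨1, Nat.one_le_pow _ _ (by norm_num), ?_⟩
      intro st res extra
      rw [runA_cache fa l h t hmz, Nat.add_comm 1 extra]
      simp [bricksRunB, hmz]
    · rw [not_ne_iff] at hmz
      by_cases hhl : h = l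
      · subst hhl
        refine ⟨1, Nat.one_le_pow _ _ (by norm_num), ?_⟩
        intro st res extra
        rw [runA_base1 fa h h t hmz rfl, Nat.add_comm 1 extra]
        simp [bricksRunB, hmz]
      · by_cases hlt : h < l
        · refine ⟨1, Nat.one_le_pow _ _ (by norm_num), ?_⟩
          intro st res extra
          rw [runA_base0 fa l h t hmz hhl hlt, Nat.add_comm 1 extra]
          simp [bricksRunB, hmz, hhl, hlt]
        · -- recursive case: h > l, so (h-l).toNat ≥ 1 and fa ≥ 1
          have hgt : l < h := by omega
          have hfa1 : 1 ≤ fa := by omega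
          obtain ⟨k1, hk1, hs1⟩ := ih (l+1) (h-l) t (by omega) (by omega)
          obtain ⟨k2, hk2, hs2⟩ := ih (l+1) h (bricksRunA fa (l+1) (h-l) t).2 (by omega) (by omega)
          refine ⟨k1 + k2 + 2, ?_, ?_⟩
          · have h3 : 2 ≤ 3 ^ fa := by
              calc 2 ≤ 3 ^ 1 := by norm_num
              _ ≤ 3 ^ fa := Nat.pow_le_pow_right (by norm_num) hfa1
            have : k1 + k2 + 2 ≤ 3 ^ fa + 3 ^ fa + 3 ^ fa := by omega
            calc k1 + k2 + 2 ≤ 3 * 3 ^ fa := by omega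
            _ = 3 ^ (fa + 1) := by ring
          · intro st res extra
            rw [runA_rec fa l h t hmz hhl hlt]
            rw [show k1 + k2 + 2 + extra = k1 + k2 + 1 + extra + 1 by omega]
            rw [show bricksRunB (k1 + k2 + 1 + extra + 1) ((l, h, false) :: st) res t
                  = bricksRunB (k1 + k2 + 1 + extra)
                      ((l+1, h-l, false) :: (l+1, h, false) :: (l, h, true) :: st) res t by
                  simp [bricksRunB, hmz, hhl, hlt]]
            rw [show k1 + k2 + 1 + extra = k1 + (k2 + (1 + extra)) by omega, hs1]
            rw [show k2 + (1 + extra) = k2 + (extra + 1) by omega, hs2]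
            simp [bricksRunB]

theorem runB_nil (f : Nat) (res : List Int) (t : List (List Int)) :
    bricksRunB f [] res t = (res, t) := by
  cases f <;> rfl

-- with fuel ≥ k the whole run of B lands on ([A's value], A's table)
theorem runB_total (l h : Int) (t : List (List Int)) (hl : 0 ≤ l) :
    bricksRunB (3 ^ ((h - l).toNat + 1)) [(l, h, false)] [] t
      = ([(bricksRunA ((h - l).toNat + 1) l h t).1], (bricksRunA ((h - l).toNat + 1) l h t).2) := by
  obtain ⟨k, hk, hs⟩ := simB ((h - l).toNat + 1) l h t hl (Nat.lt_succ_self _)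
  have hsplit : 3 ^ ((h - l).toNat + 1) = k + (3 ^ ((h - l).toNat + 1) - k) := by omega
  rw [hsplit, hs]
  exact runB_nil _ _ _

-- ===== VERDICT (by name: the statement is the Claim_ definition above) =====
theorem bricks_spec : Claim_equal_bricks := by
  intro L H memoirs _ hPre
  obtain ⟨hLin, hHin, hdisj⟩ := hPre
  unfold Spec_bricks bricks bricks_alt
  by_cases hc : PySem.List.pyGetD (PySem.List.pyGetD memoirs L []) H 0 ≠ 0
  · rw [runA_cache _ _ _ _ hc]
    have : bricksRunB (3 ^ ((H - L).toNat + 1)) [(L, H, false)] [] memoirs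
        = ([PySem.List.pyGetD (PySem.List.pyGetD memoirs L []) H 0], memoirs) := by
      rw [show 3 ^ ((H - L).toNat + 1) = (3 ^ ((H - L).toNat + 1) - 1) + 1 by
            have : 1 ≤ 3 ^ ((H - L).toNat + 1) := Nat.one_le_pow _ _ (by norm_num)
            omega]
      simp [bricksRunB, hc]
    rw [this]
    rfl
  · rw [not_ne_iff] at hc
    by_cases hhl : H = L
    · subst hhl
      rw [runA_base1 _ _ _ _ hc rfl]
      have : bricksRunB (3 ^ ((H - H).toNat + 1)) [(H, H, false)] [] memoirs = ([1], memoirs) := by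
        rw [show 3 ^ ((H - H).toNat + 1) = (3 ^ ((H - H).toNat + 1) - 1) + 1 by
              have : 1 ≤ 3 ^ ((H - H).toNat + 1) := Nat.one_le_pow _ _ (by norm_num)
              omega]
        simp [bricksRunB, hc]
      rw [this]
      rfl
    · by_cases hlt : H < L
      · rw [runA_base0 _ _ _ _ hc hhl hlt]
        have : bricksRunB (3 ^ ((H - L).toNat + 1)) [(L, H, false)] [] memoirs = ([0], memoirs) := by
          rw [show 3 ^ ((H - L).toNat + 1) = (3 ^ ((H - L).toNat + 1) - 1) + 1 by
                have : 1 ≤ 3 ^ ((H - L).toNat + 1) := Nat.one_le_pow _ _ (by norm_num)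
                omega]
          simp [bricksRunB, hc, hhl, hlt]
        rw [this]
        rfl
      · have hL0 : 0 ≤ L := by
          rcases hdisj with hnz | hle | h3
          · exact absurd hc hnz
          · omega
          · exact h3.1
        rw [runB_total L H memoirs hL0]
        rfl
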